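-- pv_equiv track=rewrite | github.com/w1r0x/gopro_join | main.py | split_videos
-- ===== SOURCE A (Python) =====
-- def split_videos(video_list):
--     videos = []
--     ids = get_video_ids(video_list)
--     for id in ids:
--         video = []
--         for i in range(1, 9):
--             for video_name in video_list:
--                 if f'{i}{id}' in video_name:
--                     video.append(video_name)
--         videos.append(video)
--     return(videos)
--
-- def get_video_ids(video_list):
--     ids = []
--     for filename in video_list:
--         id = filename[4:-4]
--         if id not in ids:
--           ids.append(id)
--     return sorted(ids)
-- ===== SOURCE B (Python) =====
-- def split_videos(video_list):
--     digits = '12345678'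
--     ids = sorted(set(name[4:-4] for name in video_list))
--     id_set = set(ids)
--     lengths = sorted(set(len(i) for i in ids))
--     buckets = {}  # (id, digit char) -> names containing digit+id, in input order
--     for name in video_list:
--         seen = set()
--         for p, ch in enumerate(name):
--             if ch in digits:
--                 for L in lengths:
--                     cand = name[p + 1 : p + 1 + L]
--                     if len(cand) == L and cand in id_set:
--                         key = (cand, ch)
--                         if key not in seen:
--                             seen.add(key)
--                             buckets.setdefault(key, []).append(name)
--     return [[name for ch in digits for name in buckets.get((id, ch), [])] for id in ids]
-- ===== Notes on version B (the rewrite author's own statement) =====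
-- stated objective: faster
-- what changed: A scans the whole file list once per (digit, id) pattern (8 substring searches over every filename per distinct id); B makes a single pass over the filenames, scanning each filename's digit positions and matching the characters after a digit against a set of the ids, collecting matches in a dict of buckets that the sorted ids then read off.
import Mathlib
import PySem

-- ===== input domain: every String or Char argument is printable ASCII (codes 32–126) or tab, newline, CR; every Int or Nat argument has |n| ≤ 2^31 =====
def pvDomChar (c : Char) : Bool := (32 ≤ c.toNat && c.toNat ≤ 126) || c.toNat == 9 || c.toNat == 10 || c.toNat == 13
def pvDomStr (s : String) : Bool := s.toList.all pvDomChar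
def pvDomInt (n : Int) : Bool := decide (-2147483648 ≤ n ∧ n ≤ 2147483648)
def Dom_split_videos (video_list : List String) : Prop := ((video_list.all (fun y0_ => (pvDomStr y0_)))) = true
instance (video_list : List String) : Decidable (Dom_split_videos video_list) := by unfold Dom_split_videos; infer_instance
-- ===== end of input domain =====

-- B replaces A's pattern-by-pattern rescan of the file list (8 digit×id patterns, each scanning every
-- filename) with a single scan of each filename's digit positions, matching the following characters
-- against a set of the ids, bucketing matches in a dict; objective: faster on many distinct ids.

-- ===== PORT A =====
def get_video_ids (video_list : List String) : List String :=
  PySem.List.sorted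
    (video_list.foldl (fun ids filename =>
      let id := PySem.Str.slice filename (some 4) (some (-4))
      if id ∈ ids then ids else ids ++ [id]) [])
    (fun x => x) false

def split_videos (video_list : List String) : List (List String) :=
  let ids := get_video_ids video_list
  ids.foldl (fun videos id =>
    videos ++ [(PySem.List.pyRange 1 9 1).foldl (fun video i =>
      video_list.foldl (fun video video_name =>
        -- f'{i}{id}' in video_name : substring test of the concatenated pattern (exact)
        if PySem.Chars.isIn ((PySem.Int.toStr i).toList ++ id.toList) video_name.toList
        then video ++ [video_name] else video) video) []]) []

-- ===== PORT B =====
-- digits = '12345678' (iterated character by character, so kept as its character list)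
def pvDigits : List Char := ['1', '2', '3', '4', '5', '6', '7', '8']

-- cand = name[p + 1 : p + 1 + L]
def pvCand (name : String) (p L : Int) : String :=
  PySem.Str.slice name (some (p + 1)) (some (p + 1 + L))

-- body of B's innermost loop ('for L in lengths: …')
def pvStepL (idSet : PySem.Set String) (name : String) (p : Int) (ch : Char)
    (st : PySem.Set (String × Char) × PySem.Dict (String × Char) (List String)) (L : Int) :
    PySem.Set (String × Char) × PySem.Dict (String × Char) (List String) :=
  let cand := pvCand name p L
  if PySem.Str.len cand = L ∧ PySem.Set.contains idSet cand = true then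
    if PySem.Set.contains st.1 (cand, ch) = true then st
    else (PySem.Set.add st.1 (cand, ch), PySem.Dict.modify st.2 (cand, ch) [] (· ++ [name]))
  else st

-- body of B's position loop ('for p, ch in enumerate(name)'); 'ch in digits' is single-char membership (exact)
def pvStepP (idSet : PySem.Set String) (lengths : List Int) (name : String)
    (st : PySem.Set (String × Char) × PySem.Dict (String × Char) (List String)) (pc : Int × Char) :
    PySem.Set (String × Char) × PySem.Dict (String × Char) (List String) :=
  if pc.2 ∈ pvDigits then lengths.foldl (pvStepL idSet name pc.1 pc.2) st else st

-- body of B's outer loop ('for name in video_list'): fresh 'seen' set, updated buckets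
def pvStepName (idSet : PySem.Set String) (lengths : List Int)
    (buckets : PySem.Dict (String × Char) (List String)) (name : String) :
    PySem.Dict (String × Char) (List String) :=
  ((PySem.List.enumerate name.toList 0).foldl (pvStepP idSet lengths name)
    ((PySem.Set.empty : PySem.Set (String × Char)), buckets)).2

def split_videos_alt (video_list : List String) : List (List String) :=
  let ids := PySem.List.sorted
    (PySem.Set.ofList (video_list.map (fun name => PySem.Str.slice name (some 4) (some (-4)))))
    (fun x => x) false
  let idSet : PySem.Set String := PySem.Set.ofList ids
  let lengths : List Int :=
    PySem.List.sorted (PySem.Set.ofList (ids.map (fun i => PySem.Str.len i))) (fun x => x) false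
  let buckets := video_list.foldl (pvStepName idSet lengths) PySem.Dict.empty
  ids.map (fun id => pvDigits.flatMap (fun ch => buckets.getD (id, ch) []))

-- ===== PRECONDITION & SPEC =====
def Spec_split_videos (video_list : List String) (out : List (List String)) : Prop := out = split_videos_alt video_list
instance (video_list : List String) (out : List (List String)) : Decidable (Spec_split_videos video_list out) := by unfold Spec_split_videos; infer_instance

-- ===== CLAIM (what is proved, stated in full; the proofs are below) =====
def Claim_equal_split_videos : Prop := ∀ (video_list : List String), Dom_split_videos video_list → Spec_split_videos video_list (split_videos video_list)

-- ===== LEMMAS AND PROOFS =====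

-- the key (cand, ch) that B's innermost body produces at position p for length L (as a Bool)
def pvKeyAt (idSet : PySem.Set String) (name : String) (p : Int) (ch : Char) (L : Int)
    (k : String × Char) : Bool :=
  let cand := pvCand name p L
  (PySem.Str.len cand == L) && PySem.Set.contains idSet cand && (k == (cand, ch))

-- some length in 'lengths' yields key k at position p
def pvLHit (idSet : PySem.Set String) (name : String) (p : Int) (ch : Char)
    (lengths : List Int) (k : String × Char) : Bool :=
  lengths.any (fun L => pvKeyAt idSet name p ch L k)

-- key k is found while scanning a list of (position, char) pairs of a name
def pvPHit (idSet : PySem.Set String) (lengths : List Int) (name : String)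
    (pcs : List (Int × Char)) (k : String × Char) : Bool :=
  pcs.any (fun pc => pvDigits.contains pc.2 && pvLHit idSet name pc.1 pc.2 lengths k)

theorem pvStepL_effect (idSet : PySem.Set String) (name : String) (p : Int) (ch : Char)
    (st : PySem.Set (String × Char) × PySem.Dict (String × Char) (List String)) (L : Int) :
    (∀ k, k ∈ (pvStepL idSet name p ch st L).1 ↔ k ∈ st.1 ∨ pvKeyAt idSet name p ch L k = true) ∧
    (∀ k, (pvStepL idSet name p ch st L).2.getD k [] =
      st.2.getD k [] ++ (if k ∉ st.1 ∧ pvKeyAt idSet name p ch L k = true then [name] else [])) := by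
  simp only [pvStepL, pvKeyAt]
  split_ifs with hg hc
  · constructor
    · intro k
      simp only [Bool.and_eq_true, beq_iff_eq]
      constructor
      · exact fun h => Or.inl h
      · rintro (h | ⟨-, rfl⟩)
        · exact h
        · exact (PySem.Set.contains_iff st.1 ((pvCand name p L), ch)).mp hc
    · intro k
      rw [if_neg]
      · simp
      · rintro ⟨hk, hkey⟩
        simp only [Bool.and_eq_true, beq_iff_eq] at hkey
        exact hk (by rw [hkey.2]; exact (PySem.Set.contains_iff st.1 ((pvCand name p L), ch)).mp hc)
  · constructor
    · intro k
      rw [PySem.Set.mem_add]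
      simp only [Bool.and_eq_true, beq_iff_eq]
      constructor
      · rintro (h | h)
        · exact Or.inl h
        · exact Or.inr ⟨⟨by simpa using beq_iff_eq.mpr hg.1, hg.2⟩, h⟩
      · rintro (h | h)
        · exact Or.inl h
        · exact Or.inr h.2
    · intro k
      by_cases hk : k = ((pvCand name p L), ch)
      · subst hk
        rw [PySem.Dict.getD_modify_self, if_pos]
        refine ⟨fun h => hc ((PySem.Set.contains_iff st.1 ((pvCand name p L), ch)).mpr h), ?_⟩
        simp only [Bool.and_eq_true, beq_iff_eq]
        exact ⟨⟨hg.1, hg.2⟩, trivial⟩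
      · rw [PySem.Dict.getD_modify_of_ne _ _ _ hk, if_neg]
        · simp
        · rintro ⟨-, hkey⟩
          simp only [Bool.and_eq_true, beq_iff_eq] at hkey
          exact hk hkey.2
  · have hkf : ∀ k : String × Char,
        ((PySem.Str.len (pvCand name p L) == L) && idSet.contains (pvCand name p L) && (k == ((pvCand name p L), ch))) = false := by
      intro k
      rw [Bool.eq_false_iff]
      intro hk
      simp only [Bool.and_eq_true, beq_iff_eq] at hk
      exact hg ⟨hk.1.1, hk.1.2⟩
    constructor
    · intro k; simp only [hkf k]; simp
    · intro k; simp only [hkf k]; simp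

-- generic composition: folding conditional-once-per-key appends over any element list
theorem pvFoldComp {E : Type} (name : String)
    (f : PySem.Set (String × Char) × PySem.Dict (String × Char) (List String) → E →
      PySem.Set (String × Char) × PySem.Dict (String × Char) (List String))
    (hit : E → (String × Char) → Bool)
    (hstep : ∀ st e, (∀ k, k ∈ (f st e).1 ↔ k ∈ st.1 ∨ hit e k = true) ∧
      (∀ k, (f st e).2.getD k [] = st.2.getD k [] ++ (if k ∉ st.1 ∧ hit e k = true then [name] else [])))
    (es : List E)
    (st : PySem.Set (String × Char) × PySem.Dict (String × Char) (List String)) :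
    (∀ k, k ∈ (es.foldl f st).1 ↔ k ∈ st.1 ∨ es.any (fun e => hit e k) = true) ∧
    (∀ k, (es.foldl f st).2.getD k [] =
      st.2.getD k [] ++ (if k ∉ st.1 ∧ es.any (fun e => hit e k) = true then [name] else [])) := by
  induction es generalizing st with
  | nil => simp
  | cons e es ih =>
    obtain ⟨m1, g1⟩ := hstep st e
    obtain ⟨mI, gI⟩ := ih (f st e)
    constructor
    · intro k
      rw [List.foldl_cons, mI k, m1 k]
      simp only [List.any_cons, Bool.or_eq_true]
      tauto
    · intro k
      rw [List.foldl_cons, gI k, g1 k, List.append_assoc]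
      congr 1
      by_cases h1 : k ∈ st.1
      · have : k ∈ (f st e).1 := (m1 k).mpr (Or.inl h1)
        simp [h1, this]
      · by_cases h2 : hit e k = true
        · have : k ∈ (f st e).1 := (m1 k).mpr (Or.inr h2)
          simp [h1, h2, this]
        · have : k ∈ (f st e).1 ↔ k ∈ st.1 := by rw [m1 k]; simp [h2]
          simp [h1, h2, this]

theorem pvLenFold (idSet : PySem.Set String) (name : String) (p : Int) (ch : Char)
    (lengths : List Int)
    (st : PySem.Set (String × Char) × PySem.Dict (String × Char) (List String)) :
    (∀ k, k ∈ (lengths.foldl (pvStepL idSet name p ch) st).1 ↔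
        k ∈ st.1 ∨ pvLHit idSet name p ch lengths k = true) ∧
    (∀ k, (lengths.foldl (pvStepL idSet name p ch) st).2.getD k [] =
        st.2.getD k [] ++
          (if k ∉ st.1 ∧ pvLHit idSet name p ch lengths k = true then [name] else [])) :=
  pvFoldComp name (pvStepL idSet name p ch) (fun L k => pvKeyAt idSet name p ch L k)
    (fun st L => pvStepL_effect idSet name p ch st L) lengths st

theorem pvStepP_effect (idSet : PySem.Set String) (lengths : List Int) (name : String)
    (st : PySem.Set (String × Char) × PySem.Dict (String × Char) (List String)) (pc : Int × Char) :
    (∀ k, k ∈ (pvStepP idSet lengths name st pc).1 ↔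
        k ∈ st.1 ∨ (pvDigits.contains pc.2 && pvLHit idSet name pc.1 pc.2 lengths k) = true) ∧
    (∀ k, (pvStepP idSet lengths name st pc).2.getD k [] =
        st.2.getD k [] ++
          (if k ∉ st.1 ∧ (pvDigits.contains pc.2 && pvLHit idSet name pc.1 pc.2 lengths k) = true
           then [name] else [])) := by
  unfold pvStepP
  by_cases hd : pc.2 ∈ pvDigits
  · rw [if_pos hd]
    have hb : pvDigits.contains pc.2 = true := by simpa using hd
    obtain ⟨m, g⟩ := pvLenFold idSet name pc.1 pc.2 lengths st
    exact ⟨fun k => by rw [m k, hb]; simp, fun k => by rw [g k, hb]; simp⟩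
  · rw [if_neg hd]
    have hb : pvDigits.contains pc.2 = false := by simpa using hd
    exact ⟨fun k => by rw [hb]; simp, fun k => by rw [hb]; simp⟩

theorem pvPosFold (idSet : PySem.Set String) (lengths : List Int) (name : String)
    (pcs : List (Int × Char))
    (st : PySem.Set (String × Char) × PySem.Dict (String × Char) (List String)) :
    (∀ k, (pcs.foldl (pvStepP idSet lengths name) st).2.getD k [] =
        st.2.getD k [] ++
          (if k ∉ st.1 ∧ pvPHit idSet lengths name pcs k = true then [name] else [])) :=
  (pvFoldComp name (pvStepP idSet lengths name)
    (fun pc k => pvDigits.contains pc.2 && pvLHit idSet name pc.1 pc.2 lengths k)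
    (fun st pc => pvStepP_effect idSet lengths name st pc) pcs st).2

theorem pvStepName_getD (idSet : PySem.Set String) (lengths : List Int)
    (buckets : PySem.Dict (String × Char) (List String)) (name : String) (k : String × Char) :
    (pvStepName idSet lengths buckets name).getD k [] =
      buckets.getD k [] ++
        (if pvPHit idSet lengths name (PySem.List.enumerate name.toList 0) k = true
         then [name] else []) := by
  unfold pvStepName
  rw [pvPosFold idSet lengths name (PySem.List.enumerate name.toList 0) (PySem.Set.empty, buckets) k]
  simp [PySem.Set.empty]

theorem pvNamesFold (idSet : PySem.Set String) (lengths : List Int) (video_list : List String)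
    (b : PySem.Dict (String × Char) (List String)) (k : String × Char) :
    (video_list.foldl (pvStepName idSet lengths) b).getD k [] =
      b.getD k [] ++
        video_list.filter
          (fun n => pvPHit idSet lengths n (PySem.List.enumerate n.toList 0) k) := by
  induction video_list generalizing b with
  | nil => simp
  | cons n ns ih =>
    rw [List.foldl_cons, ih, pvStepName_getD, List.append_assoc, List.filter_cons]
    by_cases h : pvPHit idSet lengths n (PySem.List.enumerate n.toList 0) k = true
    · simp [h]
    · simp [h]

theorem pvCand_toList (name : String) (j n : Nat) :
    (pvCand name ((0 : Int) + (j : Nat)) ((n : Nat) : Int)).toList =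
      (name.toList.drop (j + 1)).take n := by
  unfold pvCand
  have h1 : (0 : Int) + (j : Int) + 1 = ((j + 1 : Nat) : Int) := by push_cast; ring
  rw [PySem.Str.toList_slice, PySem.Chars.slice_eq_listSlice, h1, PySem.List.slice_natCast_add]

theorem pvPHit_iff (idSet : PySem.Set String) (lengths : List Int) (name : String)
    (id : String) (ch : Char) (hid : PySem.Set.contains idSet id = true)
    (hlen : PySem.Str.len id ∈ lengths) :
    pvPHit idSet lengths name (PySem.List.enumerate name.toList 0) (id, ch) = true ↔
      ch ∈ pvDigits ∧ (ch :: id.toList) <:+: name.toList := by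
  unfold pvPHit pvLHit pvKeyAt
  rw [List.any_eq_true]
  constructor
  · rintro ⟨pc, hpc, hb⟩
    obtain ⟨j, hj, rfl⟩ := (PySem.List.mem_enumerate_iff _ _ _).mp hpc
    simp only [Bool.and_eq_true] at hb
    obtain ⟨hdig, hany⟩ := hb
    obtain ⟨L, hL, hkey⟩ := List.any_eq_true.mp hany
    simp only [Bool.and_eq_true, beq_iff_eq, Prod.mk.injEq] at hkey
    obtain ⟨⟨hlenc, hmem⟩, hidc, hchc⟩ := hkey
    -- L is a natural number: the length of the candidate slice
    obtain ⟨n, rfl⟩ : ∃ n : Nat, L = (n : Int) :=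
      ⟨L.toNat, by rw [← hlenc, PySem.Str.len_eq]; simp⟩
    have hcl : (pvCand name (0 + (j : Int)) (n : Int)).toList =
        (name.toList.drop (j + 1)).take n := pvCand_toList name j n
    have hnid : id.toList.length = n := by
      rw [hidc]
      have := hlenc
      rw [PySem.Str.len_eq, Nat.cast_inj] at this
      exact this
    have hpre : id.toList <+: name.toList.drop (j + 1) := by
      rw [List.prefix_iff_eq_take, hnid, hidc, hcl]
    have hpat : (ch :: id.toList) <+: name.toList.drop j := by
      rw [List.drop_eq_getElem_cons hj, hchc]
      exact List.cons_prefix_cons.mpr ⟨rfl, hpre⟩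
    exact ⟨by simpa [hchc] using hdig, hpat.isInfix.trans (List.drop_suffix j name.toList).isInfix⟩
  · rintro ⟨hch, hinf⟩
    obtain ⟨j, hpre⟩ := (PySem.Chars.exists_prefix_drop_iff_isIn _ _).mpr
      ((PySem.Chars.isIn_iff_infix _ _).mpr hinf)
    have hj : j < name.toList.length := by
      by_contra h
      rw [List.drop_eq_nil_of_le (by omega)] at hpre
      simp [List.prefix_nil] at hpre
    rw [List.drop_eq_getElem_cons hj] at hpre
    obtain ⟨hch', hpre'⟩ := List.cons_prefix_cons.mp hpre
    refine ⟨((0 : Int) + (j : Nat), name.toList[j]), (PySem.List.mem_enumerate_iff _ _ _).mpr ⟨j, hj, rfl⟩, ?_⟩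
    simp only [Bool.and_eq_true]
    have hcand : pvCand name (0 + (j : Int)) (PySem.Str.len id) = id := by
      apply String.toList_inj.mp
      rw [PySem.Str.len_eq, show (0 + (j : Int)) = ((0 : Int) + (j : Nat)) from rfl,
        pvCand_toList]
      exact (List.prefix_iff_eq_take.mp hpre').symm
    refine ⟨by simpa [← hch'] using hch, List.any_eq_true.mpr ⟨PySem.Str.len id, hlen, ?_⟩⟩
    simp only [Bool.and_eq_true, beq_iff_eq, Prod.mk.injEq]
    exact ⟨⟨by rw [hcand], by rw [hcand]; exact hid⟩, by rw [hcand], hch'⟩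

theorem pvIds_eq (video_list : List String) :
    get_video_ids video_list =
      PySem.List.sorted
        (PySem.Set.ofList (video_list.map (fun name => PySem.Str.slice name (some 4) (some (-4)))))
        (fun x => x) false := by
  unfold get_video_ids
  congr 1
  rw [← PySem.Set.update_nil_left, PySem.Set.update_map_eq_foldl_add]
  exact PySem.List.foldl_congr_mem _ _ _ _ (fun acc x _ => (PySem.Set.add_eq_ite acc _).symm)

theorem pvRow_eq (idSet : PySem.Set String) (lengths : List Int) (vl : List String)
    (id : String) (ch : Char) (hd : ch ∈ pvDigits)
    (hid : PySem.Set.contains idSet id = true) (hlen : PySem.Str.len id ∈ lengths) :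
    (vl.foldl (pvStepName idSet lengths) PySem.Dict.empty).getD (id, ch) [] =
      vl.filter (fun n => PySem.Chars.isIn (ch :: id.toList) n.toList) := by
  rw [pvNamesFold, PySem.Dict.getD_empty, List.nil_append]
  apply List.filter_congr
  intro n _
  rw [Bool.eq_iff_iff, pvPHit_iff _ _ _ _ _ hid hlen, PySem.Chars.isIn_iff_infix]
  simp [hd]

-- ===== VERDICT (by name: the statement is the Claim_ definition above) =====
theorem split_videos_spec : Claim_equal_split_videos := by
  unfold Claim_equal_split_videos Spec_split_videos
  intro vl _
  unfold split_videos split_videos_alt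
  rw [pvIds_eq]
  simp only []
  set ids := PySem.List.sorted
    (PySem.Set.ofList (vl.map (fun name => PySem.Str.slice name (some 4) (some (-4)))))
    (fun x => x) false with hids
  set idSet := PySem.Set.ofList ids with hidSet
  set lengths := PySem.List.sorted (PySem.Set.ofList (ids.map (fun i => PySem.Str.len i)))
    (fun x => x) false with hlengths
  rw [PySem.List.foldl_append_singleton_eq_map, List.nil_append]
  apply List.map_congr_left
  intro id hid
  have hidS : PySem.Set.contains idSet id = true :=
    (PySem.Set.contains_iff idSet id).mpr ((PySem.Set.mem_ofList ids id).mpr hid)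
  have hlen : PySem.Str.len id ∈ lengths :=
    (PySem.List.mem_sorted _ _ _ _).mpr
      ((PySem.Set.mem_ofList _ _).mpr (List.mem_map_of_mem hid))
  rw [show PySem.List.pyRange 1 9 1 = [1, 2, 3, 4, 5, 6, 7, 8] from rfl,
    show pvDigits = ['1', '2', '3', '4', '5', '6', '7', '8'] from rfl]
  simp only [List.foldl_cons, List.foldl_nil, List.flatMap_cons, List.flatMap_nil]
  rw [pvRow_eq idSet lengths vl id '1' (by decide) hidS hlen,
    pvRow_eq idSet lengths vl id '2' (by decide) hidS hlen,
    pvRow_eq idSet lengths vl id '3' (by decide) hidS hlen,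
    pvRow_eq idSet lengths vl id '4' (by decide) hidS hlen,
    pvRow_eq idSet lengths vl id '5' (by decide) hidS hlen,
    pvRow_eq idSet lengths vl id '6' (by decide) hidS hlen,
    pvRow_eq idSet lengths vl id '7' (by decide) hidS hlen,
    pvRow_eq idSet lengths vl id '8' (by decide) hidS hlen]
  simp only [PySem.List.foldl_append_if_eq_filter, List.nil_append, List.append_nil,
    List.append_assoc]
  rfl
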